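-- pv_equiv track=rewrite | github.com/mile95/aoc24 | day04.py | generate_positions
-- ===== SOURCE A (Python) =====
-- def generate_positions(start):
--     result = [start]
--     x, y = start
--     for _ in range(1, 3):
--         x += (1 if x != 0 else 0) * (1 if x > 0 else -1)
--         y += (1 if y != 0 else 0) * (1 if y > 0 else -1)
--         result.append((x, y))
--     return result
-- ===== SOURCE B (Python) =====
-- def generate_positions(start):
--     x, y = start
--     dx = (x > 0) - (x < 0)
--     dy = (y > 0) - (y < 0)
--     return [(x + i * dx, y + i * dy) for i in range(3)]
-- ===== Notes on version B (the rewrite author's own statement) =====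
-- stated objective: simpler
-- what changed: Replaces the mutable running-accumulator loop (x moved away from zero by its sign each iteration) with a one-line closed form: compute the invariant direction vector once and emit the three points directly as start + i*(dx,dy).
import Mathlib
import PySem

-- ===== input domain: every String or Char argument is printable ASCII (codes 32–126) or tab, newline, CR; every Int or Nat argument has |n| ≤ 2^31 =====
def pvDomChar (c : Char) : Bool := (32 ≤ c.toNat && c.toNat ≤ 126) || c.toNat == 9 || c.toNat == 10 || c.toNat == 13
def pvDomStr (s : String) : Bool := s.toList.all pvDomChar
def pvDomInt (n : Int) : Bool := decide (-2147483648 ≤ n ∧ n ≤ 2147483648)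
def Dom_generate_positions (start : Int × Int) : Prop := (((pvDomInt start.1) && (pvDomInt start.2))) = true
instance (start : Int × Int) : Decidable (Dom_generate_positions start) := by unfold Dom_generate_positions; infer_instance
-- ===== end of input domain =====

-- B replaces A's mutable running-accumulator loop with a closed form: the direction
-- vector is computed once and the three points are emitted as start + i*(dx,dy) (simpler).

-- ===== PORT A =====
-- literal port of A: result list plus running (x, y), stepped for _ in range(1, 3)
def generate_positions (start : Int × Int) : List (Int × Int) :=
  let st := (PySem.List.pyRange 1 3 1).foldl
    (fun (st : List (Int × Int) × Int × Int) (_ : Int) =>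
      let x := st.2.1 + (if x_ne : st.2.1 ≠ 0 then 1 else 0) * (if st.2.1 > 0 then 1 else -1)
      let y := st.2.2 + (if st.2.2 ≠ 0 then 1 else 0) * (if st.2.2 > 0 then 1 else -1)
      (st.1 ++ [(x, y)], x, y))
    ([start], start.1, start.2)
  st.1

-- ===== PORT B =====
-- sign as Python's (x > 0) - (x < 0)
def pvSign (n : Int) : Int := (if n > 0 then 1 else 0) - (if n < 0 then 1 else 0)

def generate_positions_alt (start : Int × Int) : List (Int × Int) :=
  let dx := pvSign start.1
  let dy := pvSign start.2
  (PySem.List.pyRange 0 3 1).map (fun i => (start.1 + i * dx, start.2 + i * dy))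

-- ===== PRECONDITION & SPEC =====
def Spec_generate_positions (start : Int × Int) (out : List (Int × Int)) : Prop := out = generate_positions_alt start
instance (start : Int × Int) (out : List (Int × Int)) : Decidable (Spec_generate_positions start out) := by unfold Spec_generate_positions; infer_instance

-- ===== CLAIM (what is proved, stated in full; the proofs are below) =====
def Claim_equal_generate_positions : Prop := ∀ (start : Int × Int), Dom_generate_positions start → Spec_generate_positions start (generate_positions start)

-- ===== LEMMAS AND PROOFS =====

-- ===== VERDICT (by name: the statement is the Claim_ definition above) =====
set_option maxHeartbeats 2000000 in
theorem generate_positions_spec : Claim_equal_generate_positions := by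
  intro start _
  obtain ⟨x, y⟩ := start
  show generate_positions (x, y) = generate_positions_alt (x, y)
  simp only [generate_positions, generate_positions_alt, pvSign,
    PySem.List.pyRange]
  norm_num [show (2:Int).toNat = 2 from rfl, show (3:Int).toNat = 3 from rfl,
    List.range_succ]
  split_ifs <;> omega
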